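-- pv_equiv track=rewrite | github.com/mo-nathan/boxes | board.py | next_element
-- ===== SOURCE A (Python) =====
-- def next_element(remainder):
--     previous_item = 0
--     index = 0
--     for item in remainder:
--         index += 1
--         if item != 0:
--             if previous_item == item:
--                 return item * 2, remainder[index:]
--             elif previous_item != 0:
--                 return previous_item, remainder[index-1:]
--             previous_item = item
--     return previous_item, []
-- ===== SOURCE B (Python) =====
-- def next_element(remainder):
--     stack = remainder[::-1]
--     first = 0
--     while stack:
--         v = stack.pop()
--         if v != 0:
--             first = v
--             break
--     if first == 0:
--         return 0, []
--     while stack: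
--         x = stack.pop()
--         if x != 0:
--             if x == first:
--                 return first * 2, stack[::-1]
--             return first, [x] + stack[::-1]
--     return first, []
-- ===== Notes on version B (the rewrite author's own statement) =====
-- stated objective: alternative
-- what changed: Replaces A's indexed forward scan with mid-loop slice returns by an explicit stack machine: the list is reversed once, elements are pop()ed off, and the returned tail is rebuilt by reversing the leftover stack - no indices, no enumerate, no slicing of the original list.
import Mathlib
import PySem

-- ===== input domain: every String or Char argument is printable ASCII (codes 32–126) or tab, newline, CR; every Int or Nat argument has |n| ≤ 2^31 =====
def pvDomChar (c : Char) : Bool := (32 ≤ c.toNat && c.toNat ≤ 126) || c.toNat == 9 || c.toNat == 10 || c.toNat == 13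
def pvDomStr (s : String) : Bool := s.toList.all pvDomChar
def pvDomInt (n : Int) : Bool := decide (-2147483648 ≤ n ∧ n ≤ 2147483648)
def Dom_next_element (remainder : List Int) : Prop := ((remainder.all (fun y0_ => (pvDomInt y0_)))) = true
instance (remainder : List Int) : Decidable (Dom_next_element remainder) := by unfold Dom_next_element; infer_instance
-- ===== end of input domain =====

-- B replaces A's indexed forward scan (mid-loop returns of slices of the original) by an
-- explicit stack machine: reverse once, pop() elements, rebuild the tail by reversing the
-- leftover stack (objective: alternative, same O(n) cost).

-- ===== PORT A =====
def nextElemGo (orig : List Int) (items : List Int) (previous_item : Int) (index : Int) : Int × List Int :=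
  match items with
  | [] => (previous_item, [])
  | item :: rest =>
    let index := index + 1
    if item != 0 then
      if previous_item == item then
        (item * 2, PySem.List.slice orig (some index) none)
      else if previous_item != 0 then
        (previous_item, PySem.List.slice orig (some (index - 1)) none)
      else nextElemGo orig rest item index
    else nextElemGo orig rest previous_item index

def next_element (remainder : List Int) : Int × List Int :=
  nextElemGo remainder remainder 0 0

-- ===== PORT B =====
-- first while loop of Source B: pop until a nonzero is found (stack.pop() = getLast?/dropLast,
-- exact for Python's list.pop() on a nonempty list; the 'none' arm is 'while stack:' ending)
def altFind (stack : List Int) : Int × List Int :=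
  match h : stack.getLast? with
  | none => (0, [])
  | some v => if v != 0 then (v, stack.dropLast) else altFind stack.dropLast
termination_by stack.length
decreasing_by
  cases stack with
  | nil => simp at h
  | cons a r => simp [List.length_dropLast]

-- second while loop of Source B: pop looking for the partner of `first`
def altPair (first : Int) (stack : List Int) : Int × List Int :=
  match h : stack.getLast? with
  | none => (first, [])
  | some x =>
    if x != 0 then
      if x == first then (first * 2, stack.dropLast.reverse)
      else (first, x :: stack.dropLast.reverse)
    else altPair first stack.dropLast
termination_by stack.length
decreasing_by
  cases stack with
  | nil => simp at h
  | cons a r => simp [List.length_dropLast]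

def next_element_alt (remainder : List Int) : Int × List Int :=
  let fs := altFind (remainder.reverse)
  if fs.1 == 0 then (0, []) else altPair fs.1 fs.2

-- ===== PRECONDITION & SPEC =====
def Spec_next_element (remainder : List Int) (out : Int × List Int) : Prop := out = next_element_alt remainder
instance (remainder : List Int) (out : Int × List Int) : Decidable (Spec_next_element remainder out) := by unfold Spec_next_element; infer_instance

-- ===== CLAIM (what is proved, stated in full; the proofs are below) =====
def Claim_equal_next_element : Prop := ∀ (remainder : List Int), Dom_next_element remainder → Spec_next_element remainder (next_element remainder)

-- ===== LEMMAS AND PROOFS =====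

-- common structural specification: pvG scans for the partner of the first nonzero, pvF finds the first nonzero
def pvG (p : Int) : List Int → Int × List Int
  | [] => (p, [])
  | x :: rest => if x = 0 then pvG p rest else if x = p then (p * 2, rest) else (p, x :: rest)

def pvF : List Int → Int × List Int
  | [] => (0, [])
  | x :: rest => if x = 0 then pvF rest else pvG x rest

theorem pv_drop_succ {orig rest : List Int} {x : Int} {n : Nat}
    (h : orig.drop n = x :: rest) : orig.drop (n + 1) = rest := by
  have := congrArg (List.drop 1) h
  simpa [List.drop_drop, Nat.add_comm] using this

theorem pv_goA_g : ∀ (items orig : List Int) (n : Nat) (prev : Int),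
    orig.drop n = items → prev ≠ 0 → nextElemGo orig items prev (n : Int) = pvG prev items := by
  intro items
  induction items with
  | nil => intro orig n prev _ _; simp [nextElemGo, pvG]
  | cons x rest ih =>
    intro orig n prev h hp
    by_cases hx : x = 0
    · have h1 := pv_drop_succ h
      have := ih orig (n + 1) prev h1 hp
      simpa [nextElemGo, pvG, hx, Nat.cast_add] using this
    · by_cases hpx : prev = x
      · have hs : PySem.List.slice orig (some ((n : Int) + 1)) none = rest := by
          rw [show ((n : Int) + 1) = ((n + 1 : Nat) : Int) by push_cast; ring,
            PySem.List.slice_from_natCast, pv_drop_succ h]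
        simp [nextElemGo, pvG, hx, hpx, hs]
      · simp [nextElemGo, pvG, hx, hpx, hp, Ne.symm hpx,
          show ((n : Int) + 1 - 1) = ((n : Nat) : Int) by ring,
          PySem.List.slice_from_natCast, h]

theorem pv_goA_f : ∀ (items orig : List Int) (n : Nat),
    orig.drop n = items → nextElemGo orig items 0 (n : Int) = pvF items := by
  intro items
  induction items with
  | nil => intro orig n _; simp [nextElemGo, pvF]
  | cons x rest ih =>
    intro orig n h
    by_cases hx : x = 0
    · have := ih orig (n + 1) (pv_drop_succ h)
      simpa [nextElemGo, pvF, hx, Nat.cast_add] using this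
    · have := pv_goA_g rest orig (n + 1) x (pv_drop_succ h) hx
      simpa [nextElemGo, pvF, hx, Ne.symm hx, Nat.cast_add] using this

theorem pv_A_eq_pvF (r : List Int) : next_element r = pvF r := by
  simpa [next_element] using pv_goA_f r r 0 (by simp)

theorem pv_pair_rev (v : Int) : ∀ (rest : List Int), altPair v rest.reverse = pvG v rest := by
  intro rest
  induction rest with
  | nil => rw [altPair]; simp [pvG]
  | cons x r2 ih =>
    rw [show (x :: r2).reverse = r2.reverse ++ [x] by simp, altPair]
    simp only [List.dropLast_concat, List.reverse_reverse]
    split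
    · next heq => simp at heq
    · next y heq =>
      rw [List.getLast?_concat] at heq
      obtain rfl : x = y := Option.some.inj heq
      by_cases hy : x = 0
      · simpa [pvG, hy] using ih
      · simp [pvG, hy]

theorem pv_B_eq_pvF : ∀ (r : List Int), next_element_alt r = pvF r := by
  intro r
  induction r with
  | nil => rw [next_element_alt, altFind]; simp [pvF]
  | cons x rest ih =>
    rw [next_element_alt]
    rw [show (x :: rest).reverse = rest.reverse ++ [x] by simp, altFind]
    simp only [List.dropLast_concat]
    split
    · next heq => simp at heq
    · next v heq =>
      rw [List.getLast?_concat] at heq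
      obtain rfl : x = v := Option.some.inj heq
      by_cases hv : x = 0
      · rw [next_element_alt] at ih
        simpa [pvF, hv] using ih
      · simp [pvF, hv, pv_pair_rev]

-- ===== VERDICT (by name: the statement is the Claim_ definition above) =====
theorem next_element_spec : Claim_equal_next_element := by
  intro r _
  unfold Spec_next_element
  rw [pv_A_eq_pvF, pv_B_eq_pvF]
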